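-- pv_equiv track=rewrite | github.com/geobtaa/harvester-api | harvesters/oai_qdc.py | oai_select_landing_page
-- ===== SOURCE A (Python) =====
-- def oai_select_landing_page(identifiers):
--     http_identifiers = [
--         value for value in identifiers if value.lower().startswith(("http://", "https://"))
--     ]
--     preferred_patterns = ("/cdm/ref/", "/node/")
--     for pattern in preferred_patterns:
--         for value in http_identifiers:
--             if pattern in value:
--                 return value
--     for value in http_identifiers:
--         if "_foxml" not in value.lower():
--             return value
--     return ""
-- ===== SOURCE B (Python) =====
-- def oai_select_landing_page(identifiers):
--     http_identifiers = [
--         value for value in identifiers if value.lower().startswith(("http://", "https://"))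
--     ]
--
--     def rank(value):
--         if "/cdm/ref/" in value:
--             return 0
--         if "/node/" in value:
--             return 1
--         if "_foxml" not in value.lower():
--             return 2
--         return 3
--
--     candidates = [value for value in http_identifiers if rank(value) < 3]
--     if not candidates:
--         return ""
--     return min(candidates, key=rank)
-- ===== Notes on version B (the rewrite author's own statement) =====
-- stated objective: simpler
-- what changed: A's three sequential scans over the http identifiers (one per pattern, then a foxml pass) are replaced by computing one priority rank per identifier and taking the stable first-minimum of the eligible candidates with min(candidates, key=rank).
import Mathlib
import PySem

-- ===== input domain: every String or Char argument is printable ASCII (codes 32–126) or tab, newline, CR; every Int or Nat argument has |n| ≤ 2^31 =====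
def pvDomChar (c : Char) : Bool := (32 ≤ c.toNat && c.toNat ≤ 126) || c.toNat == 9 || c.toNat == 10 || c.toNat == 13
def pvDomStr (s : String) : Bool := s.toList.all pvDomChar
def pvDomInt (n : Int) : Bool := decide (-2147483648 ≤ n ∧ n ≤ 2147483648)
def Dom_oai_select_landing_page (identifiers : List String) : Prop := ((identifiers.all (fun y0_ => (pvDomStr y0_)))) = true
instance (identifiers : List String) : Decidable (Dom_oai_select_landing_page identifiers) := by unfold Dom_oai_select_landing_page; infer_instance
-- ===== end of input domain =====

-- B replaces A's three sequential scans by a single priority rank per value and one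
-- stable min over the eligible candidates (objective: simpler decomposition, same cost).

-- shared helper: the http(s) filter both Pythons' comprehensions use
def oaiHttp (v : String) : Bool :=
  PySem.Str.startswith (PySem.Str.lower v) "http://" || PySem.Str.startswith (PySem.Str.lower v) "https://"

-- ===== PORT A =====
def oai_select_landing_page (identifiers : List String) : String :=
  let http_identifiers := identifiers.filter oaiHttp
  match http_identifiers.find? (fun v => PySem.Str.isIn "/cdm/ref/" v) with
  | some v => v
  | none =>
    match http_identifiers.find? (fun v => PySem.Str.isIn "/node/" v) with
    | some v => v
    | none =>
      match http_identifiers.find? (fun v => !(PySem.Str.isIn "_foxml" (PySem.Str.lower v))) with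
      | some v => v
      | none => ""

-- ===== PORT B =====
-- B-side helper: the priority rank of one identifier
def oaiRank (v : String) : Nat :=
  if PySem.Str.isIn "/cdm/ref/" v then 0
  else if PySem.Str.isIn "/node/" v then 1
  else if !(PySem.Str.isIn "_foxml" (PySem.Str.lower v)) then 2
  else 3

def oai_select_landing_page_alt (identifiers : List String) : String :=
  let candidates := (identifiers.filter oaiHttp).filter (fun v => oaiRank v < 3)
  match PySem.List.min? candidates oaiRank with
  | some m => m
  | none => ""

-- ===== PRECONDITION & SPEC =====
def Spec_oai_select_landing_page (identifiers : List String) (out : String) : Prop := out = oai_select_landing_page_alt identifiers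
instance (identifiers : List String) (out : String) : Decidable (Spec_oai_select_landing_page identifiers out) := by unfold Spec_oai_select_landing_page; infer_instance

-- ===== CLAIM (what is proved, stated in full; the proofs are below) =====
def Claim_equal_oai_select_landing_page : Prop := ∀ (identifiers : List String), Dom_oai_select_landing_page identifiers → Spec_oai_select_landing_page identifiers (oai_select_landing_page identifiers)

-- ===== LEMMAS AND PROOFS =====

-- the fold step of Python's min(xs, key=rank) (first minimum kept)
def pvStep (acc : Option String) (x : String) : Option String :=
  match acc with
  | none => some x
  | some m => if oaiRank x < oaiRank m then some x else some m

lemma pvMinEq (xs : List String) : PySem.List.min? xs oaiRank = xs.foldl pvStep none := by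
  unfold PySem.List.min?
  refine List.foldl_ext _ pvStep none (fun acc x _ => ?_)
  cases acc <;> rfl

-- a rank-0 accumulator is never replaced
lemma pvF0 (l : List String) (b : String) (hb : oaiRank b = 0) :
    (l.filter (fun v => oaiRank v < 3)).foldl pvStep (some b) = some b := by
  induction l with
  | nil => rfl
  | cons x t ih =>
    by_cases hx : (decide (oaiRank x < 3)) = true
    · rw [List.filter_cons_of_pos (p := fun v => decide (oaiRank v < 3)) (a := x) hx, List.foldl_cons]
      have hstep : pvStep (some b) x = some b := by
        show (if oaiRank x < oaiRank b then some x else some b) = some b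
        rw [if_neg (by rw [hb]; omega)]
      rw [hstep]; exact ih
    · rw [List.filter_cons_of_neg (p := fun v => decide (oaiRank v < 3)) (a := x) hx]; exact ih

-- with a rank-1 accumulator the fold returns the first rank-0 element, else the accumulator
lemma pvF1 (l : List String) (b : String) (hb : oaiRank b = 1) :
    (l.filter (fun v => oaiRank v < 3)).foldl pvStep (some b)
      = match l.find? (fun v => PySem.Str.isIn "/cdm/ref/" v) with
        | some v => some v
        | none => some b := by
  induction l with
  | nil => rfl
  | cons x t ih =>
    by_cases h0 : PySem.Str.isIn "/cdm/ref/" x = true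
    · have hr : oaiRank x = 0 := by unfold oaiRank; rw [if_pos h0]
      rw [List.find?_cons_of_pos (p := fun v => PySem.Str.isIn "/cdm/ref/" v) h0,
        List.filter_cons_of_pos (p := fun v => decide (oaiRank v < 3)) (a := x) (by show decide (oaiRank x < 3) = true; rw [hr]; decide), List.foldl_cons]
      have hstep : pvStep (some b) x = some x := by
        show (if oaiRank x < oaiRank b then some x else some b) = some x
        rw [if_pos (by rw [hr, hb]; omega)]
      rw [hstep, pvF0 t x hr]
    · have hr1 : ¬ oaiRank x < 1 := by
        unfold oaiRank; rw [if_neg h0]; split_ifs <;> omega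
      rw [List.find?_cons_of_neg (p := fun v => PySem.Str.isIn "/cdm/ref/" v) h0]
      by_cases hx : (decide (oaiRank x < 3)) = true
      · rw [List.filter_cons_of_pos (p := fun v => decide (oaiRank v < 3)) (a := x) hx, List.foldl_cons]
        have hstep : pvStep (some b) x = some b := by
          show (if oaiRank x < oaiRank b then some x else some b) = some b
          rw [if_neg (by rw [hb]; exact hr1)]
        rw [hstep]; exact ih
      · rw [List.filter_cons_of_neg (p := fun v => decide (oaiRank v < 3)) (a := x) hx]; exact ih

-- with a rank-2 accumulator: first rank-0 element, else first rank-1 element, else the accumulator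
lemma pvF2 (l : List String) (b : String) (hb : oaiRank b = 2) :
    (l.filter (fun v => oaiRank v < 3)).foldl pvStep (some b)
      = match l.find? (fun v => PySem.Str.isIn "/cdm/ref/" v) with
        | some v => some v
        | none =>
          match l.find? (fun v => oaiRank v == 1) with
          | some v => some v
          | none => some b := by
  induction l with
  | nil => rfl
  | cons x t ih =>
    by_cases h0 : PySem.Str.isIn "/cdm/ref/" x = true
    · have hr : oaiRank x = 0 := by unfold oaiRank; rw [if_pos h0]
      rw [List.find?_cons_of_pos (p := fun v => PySem.Str.isIn "/cdm/ref/" v) h0,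
        List.filter_cons_of_pos (p := fun v => decide (oaiRank v < 3)) (a := x) (by show decide (oaiRank x < 3) = true; rw [hr]; decide), List.foldl_cons]
      have hstep : pvStep (some b) x = some x := by
        show (if oaiRank x < oaiRank b then some x else some b) = some x
        rw [if_pos (by rw [hr, hb]; omega)]
      rw [hstep, pvF0 t x hr]
    · rw [List.find?_cons_of_neg (p := fun v => PySem.Str.isIn "/cdm/ref/" v) h0]
      by_cases h1 : PySem.Str.isIn "/node/" x = true
      · have hr : oaiRank x = 1 := by unfold oaiRank; rw [if_neg h0, if_pos h1]
        rw [List.filter_cons_of_pos (p := fun v => decide (oaiRank v < 3)) (a := x) (by show decide (oaiRank x < 3) = true; rw [hr]; decide), List.foldl_cons]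
        have hstep : pvStep (some b) x = some x := by
          show (if oaiRank x < oaiRank b then some x else some b) = some x
          rw [if_pos (by rw [hr, hb]; omega)]
        rw [hstep, pvF1 t x hr,
          List.find?_cons_of_pos (p := fun v => oaiRank v == 1) (by show (oaiRank x == 1) = true; rw [hr]; rfl)]
      · have h01 : oaiRank x = if PySem.Str.isIn "_foxml" (PySem.Str.lower x) = false then 2 else 3 := by
          unfold oaiRank; rw [if_neg h0, if_neg h1]
          split_ifs with hA hB hB <;> first | rfl | simp_all
        have hner1 : ¬ (oaiRank x == 1) = true := by
          rw [h01]; split_ifs <;> simp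
        have hr2 : ¬ oaiRank x < 2 := by rw [h01]; split_ifs <;> omega
        rw [List.find?_cons_of_neg (p := fun v => oaiRank v == 1) hner1]
        by_cases hx : (decide (oaiRank x < 3)) = true
        · rw [List.filter_cons_of_pos (p := fun v => decide (oaiRank v < 3)) (a := x) hx, List.foldl_cons]
          have hstep : pvStep (some b) x = some b := by
            show (if oaiRank x < oaiRank b then some x else some b) = some b
            rw [if_neg (by rw [hb]; exact hr2)]
          rw [hstep]; exact ih
        · rw [List.filter_cons_of_neg (p := fun v => decide (oaiRank v < 3)) (a := x) hx]; exact ih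

-- when no element contains "/cdm/ref/", "/node/"-containment coincides with rank 1
lemma pvN1 (l : List String)
    (h : l.find? (fun v => PySem.Str.isIn "/cdm/ref/" v) = none) :
    l.find? (fun v => PySem.Str.isIn "/node/" v) = l.find? (fun v => oaiRank v == 1) := by
  induction l with
  | nil => rfl
  | cons x t ih =>
    have h0 : ¬ PySem.Str.isIn "/cdm/ref/" x = true := by
      intro hc
      rw [List.find?_cons_of_pos (p := fun v => PySem.Str.isIn "/cdm/ref/" v) hc] at h
      exact Option.some_ne_none x h
    have ht : t.find? (fun v => PySem.Str.isIn "/cdm/ref/" v) = none := by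
      rwa [List.find?_cons_of_neg (p := fun v => PySem.Str.isIn "/cdm/ref/" v) h0] at h
    by_cases h1 : PySem.Str.isIn "/node/" x = true
    · have hr : oaiRank x = 1 := by unfold oaiRank; rw [if_neg h0, if_pos h1]
      rw [List.find?_cons_of_pos (p := fun v => PySem.Str.isIn "/node/" v) h1,
        List.find?_cons_of_pos (p := fun v => oaiRank v == 1) (by show (oaiRank x == 1) = true; rw [hr]; rfl)]
    · have hner1 : ¬ (oaiRank x == 1) = true := by
        unfold oaiRank; rw [if_neg h0, if_neg h1]; split_ifs <;> simp
      rw [List.find?_cons_of_neg (p := fun v => PySem.Str.isIn "/node/" v) h1,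
        List.find?_cons_of_neg (p := fun v => oaiRank v == 1) hner1]
      exact ih ht

-- main lemma: A's three-scan chain equals B's filtered stable min, over any list
lemma pvChain (l : List String) :
    (match l.find? (fun v => PySem.Str.isIn "/cdm/ref/" v) with
     | some v => v
     | none =>
       match l.find? (fun v => PySem.Str.isIn "/node/" v) with
       | some v => v
       | none =>
         match l.find? (fun v => !(PySem.Str.isIn "_foxml" (PySem.Str.lower v))) with
         | some v => v
         | none => "")
    = (match (l.filter (fun v => oaiRank v < 3)).foldl pvStep none with
       | some m => m
       | none => "") := by
  induction l with
  | nil => rfl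
  | cons x t ih =>
    by_cases h0 : PySem.Str.isIn "/cdm/ref/" x = true
    · have hr : oaiRank x = 0 := by unfold oaiRank; rw [if_pos h0]
      rw [List.find?_cons_of_pos (p := fun v => PySem.Str.isIn "/cdm/ref/" v) h0,
        List.filter_cons_of_pos (p := fun v => decide (oaiRank v < 3)) (a := x) (by show decide (oaiRank x < 3) = true; rw [hr]; decide), List.foldl_cons]
      show x = match (t.filter (fun v => oaiRank v < 3)).foldl pvStep (some x) with
        | some m => m
        | none => ""
      rw [pvF0 t x hr]
    · rw [List.find?_cons_of_neg (p := fun v => PySem.Str.isIn "/cdm/ref/" v) h0]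
      by_cases h1 : PySem.Str.isIn "/node/" x = true
      · have hr : oaiRank x = 1 := by unfold oaiRank; rw [if_neg h0, if_pos h1]
        rw [List.find?_cons_of_pos (p := fun v => PySem.Str.isIn "/node/" v) h1,
          List.filter_cons_of_pos (p := fun v => decide (oaiRank v < 3)) (a := x) (by show decide (oaiRank x < 3) = true; rw [hr]; decide), List.foldl_cons]
        show _ = match (t.filter (fun v => oaiRank v < 3)).foldl pvStep (pvStep none x) with
          | some m => m
          | none => ""
        have : pvStep none x = some x := rfl
        rw [this, pvF1 t x hr]
        cases hfc : t.find? (fun v => PySem.Str.isIn "/cdm/ref/" v) <;> rfl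
      · rw [List.find?_cons_of_neg (p := fun v => PySem.Str.isIn "/node/" v) h1]
        by_cases h2 : PySem.Str.isIn "_foxml" (PySem.Str.lower x) = false
        · have hr : oaiRank x = 2 := by
            unfold oaiRank
            rw [if_neg h0, if_neg h1, if_pos (by rw [h2]; rfl)]
          rw [List.find?_cons_of_pos (p := fun v => !(PySem.Str.isIn "_foxml" (PySem.Str.lower v))) (show (!(PySem.Str.isIn "_foxml" (PySem.Str.lower x))) = true by rw [h2]; rfl),
            List.filter_cons_of_pos (p := fun v => decide (oaiRank v < 3)) (a := x) (by show decide (oaiRank x < 3) = true; rw [hr]; decide), List.foldl_cons]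
          show _ = match (t.filter (fun v => oaiRank v < 3)).foldl pvStep (pvStep none x) with
            | some m => m
            | none => ""
          have : pvStep none x = some x := rfl
          rw [this, pvF2 t x hr]
          cases hfc : t.find? (fun v => PySem.Str.isIn "/cdm/ref/" v) with
          | some v => rfl
          | none =>
            rw [pvN1 t hfc]
            cases hf1 : t.find? (fun v => oaiRank v == 1) <;> rfl
        · have h2' : PySem.Str.isIn "_foxml" (PySem.Str.lower x) = true := by
            cases hc : PySem.Str.isIn "_foxml" (PySem.Str.lower x)
            · exact absurd hc h2
            · rfl
          have hr : oaiRank x = 3 := by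
            unfold oaiRank
            rw [if_neg h0, if_neg h1, if_neg (by rw [h2']; simp)]
          rw [List.find?_cons_of_neg (p := fun v => !(PySem.Str.isIn "_foxml" (PySem.Str.lower v))) (show ¬ (!(PySem.Str.isIn "_foxml" (PySem.Str.lower x))) = true by rw [h2']; simp),
            List.filter_cons_of_neg (p := fun v => decide (oaiRank v < 3)) (a := x) (by show ¬ decide (oaiRank x < 3) = true; rw [hr]; decide)]
          exact ih

-- ===== VERDICT (by name: the statement is the Claim_ definition above) =====
theorem oai_select_landing_page_spec : Claim_equal_oai_select_landing_page := by
  intro identifiers _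
  unfold Spec_oai_select_landing_page oai_select_landing_page oai_select_landing_page_alt
  simp only [pvMinEq]
  exact pvChain (identifiers.filter oaiHttp)
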